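-- pv_equiv track=rewrite | github.com/CallMeChewy/MasterMenu | apps/finder/Tests/test_finder_simple.py | normalize_operators
-- ===== SOURCE A (Python) =====
-- def normalize_operators(formula):
--     """Direct implementation of normalize_operators for testing"""
--     operator_map = {
--         '&': ' AND ',
--         '&&': ' AND ',
--         '|': ' OR ',
--         '||': ' OR ',
--         '!': ' NOT ',
--         '~': ' NOT ',
--         '^': ' XOR '
--     }
--
--     normalized = formula
--     for symbol, replacement in operator_map.items():
--         normalized = normalized.replace(symbol, replacement)
--
--     return normalized
-- ===== SOURCE B (Python) =====
-- def normalize_operators(formula):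
--     """Single-pass rewrite: map each operator character to its word form."""
--     char_map = {'&': ' AND ', '|': ' OR ', '!': ' NOT ', '~': ' NOT ', '^': ' XOR '}
--     return ''.join(char_map.get(c, c) for c in formula)
-- ===== Notes on version B (the rewrite author's own statement) =====
-- stated objective: idiomatic
-- what changed: Replaces seven sequential whole-string .replace passes (two of which, for '&&' and '||', can never fire) with a single character-by-character pass over the string using one char-to-word table and a join.
import Mathlib
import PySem

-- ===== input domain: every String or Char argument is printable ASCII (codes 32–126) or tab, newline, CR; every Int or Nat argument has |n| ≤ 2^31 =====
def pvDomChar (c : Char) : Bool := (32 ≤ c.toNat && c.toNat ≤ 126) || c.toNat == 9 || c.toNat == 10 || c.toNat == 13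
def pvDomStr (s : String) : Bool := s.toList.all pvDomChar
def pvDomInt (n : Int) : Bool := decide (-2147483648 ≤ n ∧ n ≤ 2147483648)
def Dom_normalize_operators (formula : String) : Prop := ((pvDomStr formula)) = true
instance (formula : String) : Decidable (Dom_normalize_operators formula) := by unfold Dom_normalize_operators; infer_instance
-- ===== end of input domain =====

-- B replaces seven sequential whole-string replace passes (the '&&'/'||' ones never fire)
-- with a single character-by-character pass over one char-to-word table (idiomatic rewrite).


-- ===== PORT A =====
-- dict literal (distinct keys) iterated in insertion order, one whole-string replace per entry
def normalize_operators (formula : String) : String :=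
  let operator_map : List (String × String) :=
    [("&", " AND "), ("&&", " AND "), ("|", " OR "), ("||", " OR "),
     ("!", " NOT "), ("~", " NOT "), ("^", " XOR ")]
  operator_map.foldl (fun normalized p => PySem.Str.replace normalized p.1 p.2) formula

-- ===== PORT B =====
-- char_map.get(c, c) : the word form for an operator character, the character itself otherwise
def pvCharMap (c : Char) : String :=
  if c = '&' then " AND "
  else if c = '|' then " OR "
  else if c = '!' then " NOT "
  else if c = '~' then " NOT "
  else if c = '^' then " XOR "
  else String.singleton c

-- ''.join(char_map.get(c, c) for c in formula)
def normalize_operators_alt (formula : String) : String :=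
  PySem.Str.join "" (formula.toList.map pvCharMap)

-- ===== PRECONDITION & SPEC =====
def Spec_normalize_operators (formula : String) (out : String) : Prop := out = normalize_operators_alt formula
instance (formula : String) (out : String) : Decidable (Spec_normalize_operators formula out) := by unfold Spec_normalize_operators; infer_instance

-- ===== CLAIM (what is proved, stated in full; the proofs are below) =====
def Claim_equal_normalize_operators : Prop := ∀ (formula : String), Dom_normalize_operators formula → Spec_normalize_operators formula (normalize_operators formula)

-- ===== LEMMAS AND PROOFS =====

-- replacing a single character a by `new`, elementwise view
def pvG (a : Char) (new : List Char) : Char → List Char := fun c => if c = a then new else [c]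

theorem pvGo_single (a : Char) (new : List Char) :
    ∀ (l acc : List Char) (fuel : Nat), l.length ≤ fuel →
      PySem.Chars.replace.go [a] new fuel l acc
        = acc.reverse ++ l.flatMap (pvG a new) := by
  intro l
  induction l with
  | nil =>
    intro acc fuel _
    cases fuel <;> simp [PySem.Chars.replace.go]
  | cons c t ih =>
    intro acc fuel hf
    cases fuel with
    | zero => simp at hf
    | succ f =>
      have hf' : t.length ≤ f := by simpa using hf
      by_cases hc : c = a
      · subst hc
        simp [PySem.Chars.replace.go, List.isPrefixOf, ih (new.reverse ++ acc) f hf', pvG]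
      · have : ([a].isPrefixOf (c :: t)) = false := by
          simp [List.isPrefixOf]
          exact fun h => hc h.symm
        simp [PySem.Chars.replace.go, this, ih (c :: acc) f hf', pvG, hc]

theorem pvReplace_single (l : List Char) (a : Char) (new : List Char) :
    PySem.Chars.replace l [a] new = l.flatMap (pvG a new) := by
  simpa [PySem.Chars.replace] using pvGo_single a new l [] l.length le_rfl

theorem pvGo_noocc (old new : List Char) :
    ∀ (l acc : List Char) (fuel : Nat), l.length ≤ fuel → ¬ old <:+: l →
      PySem.Chars.replace.go old new fuel l acc = acc.reverse ++ l := by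
  intro l
  induction l with
  | nil =>
    intro acc fuel _ _
    cases fuel <;> simp [PySem.Chars.replace.go]
  | cons c t ih =>
    intro acc fuel hf hinf
    cases fuel with
    | zero => simp at hf
    | succ f =>
      have hf' : t.length ≤ f := by simpa using hf
      have hpre : old.isPrefixOf (c :: t) = false := by
        by_contra h
        exact hinf ((List.isPrefixOf_iff_prefix.mp (by simpa using h)).isInfix)
      have hinf' : ¬ old <:+: t := fun h => hinf (h.trans (t.suffix_cons c).isInfix)
      simp [PySem.Chars.replace.go, hpre, ih (c :: acc) f hf' hinf']

theorem pvReplace_noocc (l old new : List Char) (hne : old ≠ []) (h : ¬ old <:+: l) :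
    PySem.Chars.replace l old new = l := by
  simp [PySem.Chars.replace, hne]
  simpa using pvGo_noocc old new l [] l.length le_rfl h

-- after replacing a (with an a-free replacement), a no longer occurs
theorem pvNot_mem_flatMap (a : Char) (new : List Char) (ha : a ∉ new) (l : List Char) :
    a ∉ l.flatMap (pvG a new) := by
  intro h
  rcases List.mem_flatMap.mp h with ⟨c, _, hc⟩
  unfold pvG at hc
  split at hc
  · exact ha hc
  · next hne => simp at hc; exact hne hc.symm

theorem pvNot_infix_dup (a : Char) (l : List Char) (h : a ∉ l) : ¬ [a, a] <:+: l := by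
  intro hinf
  exact h (hinf.subset (by simp))

theorem pvChain_eq (s : List Char) :
    ((((s.flatMap (pvG '&' " AND ".toList)).flatMap (pvG '|' " OR ".toList)).flatMap
        (pvG '!' " NOT ".toList)).flatMap (pvG '~' " NOT ".toList)).flatMap (pvG '^' " XOR ".toList)
      = s.flatMap (fun c => (pvCharMap c).toList) := by
  simp only [List.flatMap_assoc]
  congr 1
  funext c
  by_cases h1 : c = '&'; · subst h1; decide
  by_cases h2 : c = '|'; · subst h2; decide
  by_cases h3 : c = '!'; · subst h3; decide
  by_cases h4 : c = '~'; · subst h4; decide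
  by_cases h5 : c = '^'; · subst h5; decide
  simp [pvG, pvCharMap, h1, h2, h3, h4, h5, String.singleton]

theorem pvJoin_empty (parts : List (List Char)) :
    PySem.Chars.join [] parts = parts.flatMap id := by
  induction parts with
  | nil => simp [PySem.Chars.join, List.intercalate, List.intersperse]
  | cons p ps ih =>
    cases ps with
    | nil => simp [PySem.Chars.join, List.intercalate, List.intersperse]
    | cons q qs =>
      simp only [PySem.Chars.join, List.intercalate] at *
      simp_all [List.intersperse]

-- ===== VERDICT (by name: the statement is the Claim_ definition above) =====
theorem normalize_operators_spec : Claim_equal_normalize_operators := by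
  intro formula _
  unfold Spec_normalize_operators normalize_operators normalize_operators_alt
  rw [← String.toList_inj]
  simp only [List.foldl, PySem.Str.toList_replace, PySem.Str.toList_join,
    show "&".toList = ['&'] from rfl, show "&&".toList = ['&', '&'] from rfl,
    show "|".toList = ['|'] from rfl, show "||".toList = ['|', '|'] from rfl,
    show "!".toList = ['!'] from rfl, show "~".toList = ['~'] from rfl,
    show "^".toList = ['^'] from rfl, show "".toList = ([] : List Char) from rfl]
  set s := formula.toList with hs
  rw [pvReplace_single s '&' _,
    pvReplace_noocc _ ['&', '&'] _ (by decide)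
      (pvNot_infix_dup '&' _ (pvNot_mem_flatMap '&' _ (by decide) s)),
    pvReplace_single _ '|' _,
    pvReplace_noocc _ ['|', '|'] _ (by decide)
      (pvNot_infix_dup '|' _ (pvNot_mem_flatMap '|' _ (by decide) _)),
    pvReplace_single _ '!' _, pvReplace_single _ '~' _, pvReplace_single _ '^' _,
    pvChain_eq, pvJoin_empty]
  simp [List.flatMap_map]
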